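-- pv_equiv track=rewrite | github.com/ypwcharles/prediction-market-analysis-skill | runtime/src/polymarket_alert_bot/templates/heartbeat.py | _render_sleeve_counts
-- ===== SOURCE A (Python) =====
-- from typing import Any, Mapping
--
-- def _render_sleeve_counts(counts: Mapping[str, Any]) -> str:
--     ordered = [
--         "hot_board",
--         "short_dated",
--         "newly_listed",
--         "family_inconsistency",
--         "anchor_gap",
--         "unassigned",
--     ]
--     parts: list[str] = []
--     for sleeve in ordered:
--         value = counts.get(sleeve)
--         if value in (None, 0, "0"):
--             continue
--         parts.append(f"{sleeve}={value}")
--     for sleeve, value in counts.items():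
--         if sleeve in ordered or value in (None, 0, "0"):
--             continue
--         parts.append(f"{sleeve}={value}")
--     return " | ".join(parts) if parts else "-"
-- ===== SOURCE B (Python) =====
-- from typing import Any, Mapping
--
-- def _render_sleeve_counts(counts: Mapping[str, Any]) -> str:
--     ordered = [
--         "hot_board",
--         "short_dated",
--         "newly_listed",
--         "family_inconsistency",
--         "anchor_gap",
--         "unassigned",
--     ]
--     rank = {k: i for i, k in enumerate(ordered)}
--     buckets = [[] for _ in range(len(ordered) + 1)]
--     for k, v in counts.items():
--         if v not in (None, 0, "0"):
--             buckets[rank.get(k, len(ordered))].append(f"{k}={v}")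
--     parts = [p for b in buckets for p in b]
--     return " | ".join(parts) if parts else "-"
-- ===== Notes on version B (the rewrite author's own statement) =====
-- stated objective: alternative
-- what changed: Replaces A's two staged filtered loops (fixed-order keys via counts.get, then remaining items) by a bucket sort: one pass over the items distributes each formatted entry into a rank-indexed bucket (rank = position in the fixed list, 6 for extras) and the buckets are flattened; Pre_ excludes association lists with duplicate keys, which do not represent any Python dict input.
import Mathlib
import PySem

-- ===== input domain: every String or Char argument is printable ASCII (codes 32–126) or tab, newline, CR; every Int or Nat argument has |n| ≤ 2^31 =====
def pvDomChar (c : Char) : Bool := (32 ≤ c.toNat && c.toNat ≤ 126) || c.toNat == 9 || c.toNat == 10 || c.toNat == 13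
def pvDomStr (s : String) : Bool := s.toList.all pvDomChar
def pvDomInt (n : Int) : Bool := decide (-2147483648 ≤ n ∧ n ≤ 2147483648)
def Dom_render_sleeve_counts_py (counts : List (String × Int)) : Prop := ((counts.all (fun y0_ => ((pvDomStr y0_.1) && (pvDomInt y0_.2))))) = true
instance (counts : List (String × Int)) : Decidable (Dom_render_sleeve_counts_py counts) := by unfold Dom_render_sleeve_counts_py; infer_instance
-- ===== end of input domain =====

-- B replaces A's two staged filtered loops by a single-pass bucket sort on a rank index (objective: alternative).

-- shared literal: the fixed 6-element `ordered` list both Pythons spell out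
def pvOrdered : List String :=
  ["hot_board", "short_dated", "newly_listed", "family_inconsistency", "anchor_gap", "unassigned"]

-- the f-string "{sleeve}={value}" (on code points; exact for any String and Int)
def pvFmt (k : String) (v : Int) : String := String.ofList (k.toList ++ ['='] ++ PySem.Int.toChars v)

-- ===== PORT A =====
def render_sleeve_counts_py (counts : List (String × Int)) : String :=
  let parts : List String :=
    pvOrdered.foldl (fun parts sleeve =>
      match (PySem.Dict.mk counts).get? sleeve with
      | none => parts                                        -- value in (None, 0, "0") → continue
      | some v => if v = 0 then parts else parts ++ [pvFmt sleeve v]) []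
  let parts : List String :=
    counts.foldl (fun parts p =>
      if p.1 ∈ pvOrdered || p.2 = 0 then parts else parts ++ [pvFmt p.1 p.2]) parts
  if parts = [] then "-" else PySem.Str.join " | " parts

-- ===== PORT B =====
-- rank = {k: i for i, k in enumerate(ordered)}
def pvRankDict : PySem.Dict String Int :=
  (PySem.List.enumerate pvOrdered 0).foldl (fun d p => d.insert p.2 p.1) PySem.Dict.empty

-- loop body: if v not in (None, 0, "0"): buckets[rank.get(k, len(ordered))].append(f"{k}={v}")
def pvBucketStep (bs : List (List String)) (p : String × Int) : List (List String) :=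
  if p.2 = 0 then bs
  else
    -- the rank values are 0..6, never negative, so .toNat is exact for this index
    let r : Nat := (pvRankDict.getD p.1 6).toNat
    bs.set r (bs.getD r [] ++ [pvFmt p.1 p.2])

def render_sleeve_counts_py_alt (counts : List (String × Int)) : String :=
  let buckets : List (List String) := counts.foldl pvBucketStep (List.replicate 7 [])
  let parts : List String := buckets.flatten
  if parts = [] then "-" else PySem.Str.join " | " parts

-- ===== PRECONDITION & SPEC =====
-- Pre_ excludes association lists with duplicate keys: they do not represent a Python dict
-- (A's argument is a Mapping, which cannot hold duplicate keys), so behaviour there is accidental.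
def Pre_render_sleeve_counts_py (counts : List (String × Int)) : Prop :=
  (counts.map Prod.fst).Nodup
instance (counts : List (String × Int)) : Decidable (Pre_render_sleeve_counts_py counts) := by
  unfold Pre_render_sleeve_counts_py; infer_instance

def pvWitness_render_sleeve_counts_py : (List (String × Int)) := [("hot_board", 2), ("a", 1), ("b", 0)]

def Spec_render_sleeve_counts_py (counts : List (String × Int)) (out : String) : Prop := out = render_sleeve_counts_py_alt counts
instance (counts : List (String × Int)) (out : String) : Decidable (Spec_render_sleeve_counts_py counts out) := by unfold Spec_render_sleeve_counts_py; infer_instance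

-- ===== CLAIM (what is proved, stated in full; the proofs are below) =====
def Claim_equal_render_sleeve_counts_py : Prop := ∀ (counts : List (String × Int)), Dom_render_sleeve_counts_py counts → Pre_render_sleeve_counts_py counts → Spec_render_sleeve_counts_py counts (render_sleeve_counts_py counts)

-- ===== LEMMAS AND PROOFS =====

-- proof-side closed form of rank.get(k, 6)
def pvRank (k : String) : Int :=
  if k = "hot_board" then 0
  else if k = "short_dated" then 1
  else if k = "newly_listed" then 2
  else if k = "family_inconsistency" then 3
  else if k = "anchor_gap" then 4
  else if k = "unassigned" then 5
  else 6

theorem pvRank_nonneg (k : String) : 0 ≤ pvRank k := by unfold pvRank; split_ifs <;> omega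

theorem pvRank_le (k : String) : pvRank k ≤ 6 := by unfold pvRank; split_ifs <;> omega

theorem pvRankDict_eq : pvRankDict = PySem.Dict.mk
    [("hot_board", 0), ("short_dated", 1), ("newly_listed", 2),
     ("family_inconsistency", 3), ("anchor_gap", 4), ("unassigned", 5)] := by rfl

theorem pvRankDict_getD (k : String) : pvRankDict.getD k 6 = pvRank k := by
  rw [pvRankDict_eq]
  simp [PySem.Dict.getD_eq_get?_getD, PySem.Dict.get?_mk_cons, pvRank]
  by_cases h1 : k = "hot_board"
  · subst h1; rfl
  by_cases h2 : k = "short_dated"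
  · subst h2; rfl
  by_cases h3 : k = "newly_listed"
  · subst h3; rfl
  by_cases h4 : k = "family_inconsistency"
  · subst h4; rfl
  by_cases h5 : k = "anchor_gap"
  · subst h5; rfl
  by_cases h6 : k = "unassigned"
  · subst h6; rfl
  simp [Ne.symm h1, Ne.symm h2, Ne.symm h3, Ne.symm h4, Ne.symm h5, Ne.symm h6,
        h1, h2, h3, h4, h5, h6, PySem.Dict.get?]

-- the i-th bucket B's loop accumulates, as a filterMap over the processed items
def pvBucket (counts : List (String × Int)) (i : Nat) : List String :=
  counts.filterMap (fun p => if p.2 ≠ 0 ∧ pvRank p.1 = (i : Int) then some (pvFmt p.1 p.2) else none)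

theorem pvSet_map_range (n r : Nat) (f : Nat → List String) (x : List String) :
    ((List.range n).map f).set r x = (List.range n).map (fun i => if i = r then x else f i) := by
  apply List.ext_getElem
  · simp
  · intro i h1 h2
    simp only [List.getElem_set, List.getElem_map, List.getElem_range] at *
    split_ifs <;> first | rfl | omega

theorem pvGetD_map_range (n r : Nat) (hr : r < n) (f : Nat → List String) :
    ((List.range n).map f).getD r [] = f r := by
  simp [List.getD, hr]

-- loop invariant of B's single pass: the state stays a 7-vector of per-rank buckets
theorem pvFoldB_inv (l : List (String × Int)) (f : Nat → List String) :
    l.foldl pvBucketStep ((List.range 7).map f)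
      = (List.range 7).map (fun i => f i ++ pvBucket l i) := by
  induction l generalizing f with
  | nil => simp [pvBucket]
  | cons p l ih =>
    by_cases hz : p.2 = 0
    · rw [List.foldl_cons, show pvBucketStep ((List.range 7).map f) p = (List.range 7).map f by
        simp [pvBucketStep, hz]]
      rw [ih f]
      refine List.map_congr_left (fun i _ => ?_)
      simp [pvBucket, hz]
    · have hnn := pvRank_nonneg p.1
      have hle := pvRank_le p.1
      have hr7 : (pvRank p.1).toNat < 7 := by omega
      rw [List.foldl_cons]
      have hstep : pvBucketStep ((List.range 7).map f) p
          = (List.range 7).map (fun i => if i = (pvRank p.1).toNat then f (pvRank p.1).toNat ++ [pvFmt p.1 p.2] else f i) := by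
        simp only [pvBucketStep, if_neg hz, pvRankDict_getD]
        rw [pvGetD_map_range 7 _ hr7, pvSet_map_range 7 _]
      rw [hstep, ih]
      refine List.map_congr_left (fun i hi => ?_)
      have hi7 : i < 7 := List.mem_range.mp hi
      by_cases hir : i = (pvRank p.1).toNat
      · have hpi : pvRank p.1 = (i : Int) := by omega
        rw [if_pos hir,
          show pvBucket (p :: l) i = pvFmt p.1 p.2 :: pvBucket l i by simp [pvBucket, hz, hpi],
          ← hir]
        simp
      · have hpi : ¬ (pvRank p.1 = (i : Int)) := by omega
        simp [pvBucket, hz, hpi, hir]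

-- A's uniform per-key test of the first loop
def pvPickD (d : PySem.Dict String Int) (k : String) : Option String :=
  match d.get? k with
  | none => none
  | some v => if v = 0 then none else some (pvFmt k v)

-- A's first loop is the filterMap of pvPickD over the key list
theorem pvFoldA_eq_filterMap (d : PySem.Dict String Int) (l : List String) (acc : List String) :
    l.foldl (fun parts sleeve =>
      match d.get? sleeve with
      | none => parts
      | some v => if v = 0 then parts else parts ++ [pvFmt sleeve v]) acc
      = acc ++ l.filterMap (pvPickD d) := by
  induction l generalizing acc with
  | nil => simp
  | cons k l ih =>
    simp only [List.foldl_cons, List.filterMap_cons]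
    cases h : d.get? k with
    | none =>
      have hp : pvPickD d k = none := by simp [pvPickD, h]
      simp only [hp]; exact ih acc
    | some v =>
      by_cases hv : v = 0
      · have hp : pvPickD d k = none := by simp [pvPickD, h, hv]
        simp only [hp, hv, if_pos]; exact ih acc
      · have hp : pvPickD d k = some (pvFmt k v) := by simp [pvPickD, h, hv]
        simp only [hp, if_neg hv]
        rw [ih (acc ++ [pvFmt k v])]; simp

-- A's second loop as a filterMap over the items
theorem pvFoldA2_eq_filterMap (counts : List (String × Int)) (acc : List String) :
    counts.foldl (fun parts p =>
      if p.1 ∈ pvOrdered || p.2 = 0 then parts else parts ++ [pvFmt p.1 p.2]) acc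
      = acc ++ counts.filterMap (fun p =>
          if p.1 ∈ pvOrdered ∨ p.2 = 0 then none else some (pvFmt p.1 p.2)) := by
  induction counts generalizing acc with
  | nil => simp
  | cons p l ih =>
    simp only [List.foldl_cons, List.filterMap_cons]
    by_cases h : p.1 ∈ pvOrdered ∨ p.2 = 0
    · rw [if_pos (by simpa using h), if_pos h]
      exact ih acc
    · rw [if_neg (by simpa using h), if_neg h, ih]
      simp
  -- Bool/Prop bridging note: `p.1 ∈ pvOrdered || p.2 = 0` elaborates through Decidable, simpa aligns the two

-- a bucket keyed by one fixed sleeve name equals A's dict pick, when keys are unique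
theorem pvKeyFilter (counts : List (String × Int)) (hnd : (counts.map Prod.fst).Nodup)
    (c : Int) (k0 : String) (hc : ∀ s, pvRank s = c ↔ s = k0) :
    counts.filterMap (fun p => if p.2 ≠ 0 ∧ pvRank p.1 = c then some (pvFmt p.1 p.2) else none)
      = (pvPickD (PySem.Dict.mk counts) k0).toList := by
  induction counts with
  | nil => simp [pvPickD, PySem.Dict.get?]
  | cons q l ih =>
    simp only [List.map_cons, List.nodup_cons] at hnd
    by_cases hq : q.1 = k0
    · have htail : l.filterMap (fun p => if p.2 ≠ 0 ∧ pvRank p.1 = c then some (pvFmt p.1 p.2) else none) = [] := by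
        rw [List.filterMap_eq_nil_iff]
        intro p hp
        have hne : p.1 ≠ k0 := by
          intro he
          exact hnd.1 (by rw [hq, ← he]; exact List.mem_map_of_mem hp)
        simp [(hc p.1).not.mpr hne]
      have hget : (PySem.Dict.mk (q :: l)).get? k0 = some q.2 := by
        rw [PySem.Dict.get?_mk_cons, if_pos (by simpa using hq)]
      by_cases hz : q.2 = 0
      · simp [hz, htail, pvPickD, hget]
      · simp [hz, htail, pvPickD, hget, hq, (hc k0).mpr rfl]
    · have hhead : (if q.2 ≠ 0 ∧ pvRank q.1 = c then some (pvFmt q.1 q.2) else none) = none := by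
        simp [(hc q.1).not.mpr hq]
      have hget : (PySem.Dict.mk (q :: l)).get? k0 = (PySem.Dict.mk l).get? k0 := by
        rw [PySem.Dict.get?_mk_cons, if_neg (by simpa using hq)]
      simp only [List.filterMap_cons, hhead, pvPickD, hget]
      exact ih hnd.2

-- the overflow bucket (rank 6) is exactly A's second loop
theorem pvBucket6 (counts : List (String × Int)) :
    pvBucket counts 6 = counts.filterMap (fun p =>
      if p.1 ∈ pvOrdered ∨ p.2 = 0 then none else some (pvFmt p.1 p.2)) := by
  apply List.filterMap_congr
  intro p _
  have h6 : pvRank p.1 = 6 ↔ p.1 ∉ pvOrdered := by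
    unfold pvRank; split_ifs <;> simp_all [pvOrdered]
  by_cases hm : p.1 ∈ pvOrdered
  · have hn : ¬ (p.2 ≠ 0 ∧ pvRank p.1 = 6) := by
      rintro ⟨-, h⟩; exact (h6.mp h) hm
    simp [hn, hm]
  · by_cases hz : p.2 = 0
    · simp [hz, hm]
    · simp [hz, hm, h6.mpr hm]

theorem pvRankIff0 : ∀ s, pvRank s = 0 ↔ s = "hot_board" := by
  intro s; unfold pvRank; split_ifs <;> simp_all
theorem pvRankIff1 : ∀ s, pvRank s = 1 ↔ s = "short_dated" := by
  intro s; unfold pvRank; split_ifs <;> simp_all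
theorem pvRankIff2 : ∀ s, pvRank s = 2 ↔ s = "newly_listed" := by
  intro s; unfold pvRank; split_ifs <;> simp_all
theorem pvRankIff3 : ∀ s, pvRank s = 3 ↔ s = "family_inconsistency" := by
  intro s; unfold pvRank; split_ifs <;> simp_all
theorem pvRankIff4 : ∀ s, pvRank s = 4 ↔ s = "anchor_gap" := by
  intro s; unfold pvRank; split_ifs <;> simp_all
theorem pvRankIff5 : ∀ s, pvRank s = 5 ↔ s = "unassigned" := by
  intro s; unfold pvRank; split_ifs <;> simp_all

-- ===== VERDICT (by name: the statement is the Claim_ definition above) =====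
-- filterMap on a cons, in Option.toList form
theorem pvFilterMap_cons_toList {α β : Type} (f : α → Option β) (a : α) (l : List α) :
    List.filterMap f (a :: l) = (f a).toList ++ List.filterMap f l := by
  cases h : f a <;> simp [h]

theorem render_sleeve_counts_py_spec : Claim_equal_render_sleeve_counts_py := by
  intro counts _ hpre
  unfold Spec_render_sleeve_counts_py
  simp only [render_sleeve_counts_py, render_sleeve_counts_py_alt]
  have hrepl : (List.replicate 7 ([] : List String)) = (List.range 7).map (fun _ => []) := by rfl
  rw [hrepl, pvFoldB_inv counts (fun _ => []),
      pvFoldA_eq_filterMap (PySem.Dict.mk counts) pvOrdered [],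
      pvFoldA2_eq_filterMap counts]
  have hb0 : pvBucket counts 0 = (pvPickD (PySem.Dict.mk counts) "hot_board").toList := by
    have h := pvKeyFilter counts hpre 0 "hot_board" pvRankIff0
    unfold pvBucket; simpa using h
  have hb1 : pvBucket counts 1 = (pvPickD (PySem.Dict.mk counts) "short_dated").toList := by
    have h := pvKeyFilter counts hpre 1 "short_dated" pvRankIff1
    unfold pvBucket; simpa using h
  have hb2 : pvBucket counts 2 = (pvPickD (PySem.Dict.mk counts) "newly_listed").toList := by
    have h := pvKeyFilter counts hpre 2 "newly_listed" pvRankIff2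
    unfold pvBucket; simpa using h
  have hb3 : pvBucket counts 3 = (pvPickD (PySem.Dict.mk counts) "family_inconsistency").toList := by
    have h := pvKeyFilter counts hpre 3 "family_inconsistency" pvRankIff3
    unfold pvBucket; simpa using h
  have hb4 : pvBucket counts 4 = (pvPickD (PySem.Dict.mk counts) "anchor_gap").toList := by
    have h := pvKeyFilter counts hpre 4 "anchor_gap" pvRankIff4
    unfold pvBucket; simpa using h
  have hb5 : pvBucket counts 5 = (pvPickD (PySem.Dict.mk counts) "unassigned").toList := by
    have h := pvKeyFilter counts hpre 5 "unassigned" pvRankIff5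
    unfold pvBucket; simpa using h
  have hparts :
      ([] : List String) ++ pvOrdered.filterMap (pvPickD (PySem.Dict.mk counts))
        ++ counts.filterMap (fun p =>
            if p.1 ∈ pvOrdered ∨ p.2 = 0 then none else some (pvFmt p.1 p.2))
      = ((List.range 7).map (fun i => ([] : List String) ++ pvBucket counts i)).flatten := by
    rw [show List.range 7 = [0, 1, 2, 3, 4, 5, 6] from rfl]
    simp only [List.map_cons, List.map_nil, List.flatten_cons, List.flatten_nil,
      List.nil_append, List.append_nil]
    rw [hb0, hb1, hb2, hb3, hb4, hb5, pvBucket6]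
    simp only [pvOrdered, pvFilterMap_cons_toList, List.filterMap_nil,
      List.append_nil, List.append_assoc]
  rw [hparts]
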